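-- pv_equiv track=rewrite | github.com/JeongEunJi1127/Algorithm | Programmers/133502.py | solution
-- ===== SOURCE A (Python) =====
-- def solution(ingredient):
--     answer = 0
--     hamburger = []
--
--     # 1:빵 2:야채 3:고기
--     for i in ingredient:
--         hamburger.append(i)
--         if isBurger(hamburger[-4:]):
--             answer += 1
--             for _ in range(4):
--                 hamburger.pop()
--     return answer
--
-- def isBurger(array):
--     if array == [1,2,3,1]:
--         return True
--     else:
--         return False
-- ===== SOURCE B (Python) =====
-- def solution(ingredient):
--     # Repeated scan-and-splice: find the leftmost contiguous [1,2,3,1] block,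
--     # delete it, and rescan until no block remains.
--     items = list(ingredient)
--     count = 0
--     while True:
--         found = False
--         for i in range(len(items) - 3):
--             if items[i:i+4] == [1, 2, 3, 1]:
--                 items[i:i+4] = []
--                 count += 1
--                 found = True
--                 break
--         if not found:
--             return count
-- ===== Notes on version B (the rewrite author's own statement) =====
-- stated objective: alternative
-- what changed: Replaces A's one-pass push-and-pop stack with repeated whole-list scanning: find the leftmost contiguous [1,2,3,1] block, splice it out, and rescan until none remains.
import Mathlib
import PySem

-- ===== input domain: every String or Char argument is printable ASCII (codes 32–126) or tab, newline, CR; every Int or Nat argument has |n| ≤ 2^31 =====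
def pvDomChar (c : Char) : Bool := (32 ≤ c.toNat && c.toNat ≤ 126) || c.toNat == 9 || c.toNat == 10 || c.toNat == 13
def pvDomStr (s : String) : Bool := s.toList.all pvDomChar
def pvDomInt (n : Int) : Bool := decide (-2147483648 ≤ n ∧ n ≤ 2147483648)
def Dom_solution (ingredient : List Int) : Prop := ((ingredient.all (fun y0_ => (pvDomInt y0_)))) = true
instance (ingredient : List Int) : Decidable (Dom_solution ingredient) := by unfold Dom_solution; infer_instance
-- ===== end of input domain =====

-- B replaces A's single-pass stack with repeated leftmost scan-and-splice of the
-- whole [1,2,3,1] block (objective: alternative decomposition, not faster).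

-- ===== PORT A =====
def isBurger (array : List Int) : Bool :=
  if array = [1, 2, 3, 1] then true else false

def stepA (st : Int × List Int) (i : Int) : Int × List Int :=
  let hamburger := st.2 ++ [i]
  if isBurger (PySem.List.slice hamburger (some (-4)) none) then
    (st.1 + 1, (List.range 4).foldl (fun h _ => h.dropLast) hamburger)
  else
    (st.1, hamburger)

def solution (ingredient : List Int) : Int :=
  (ingredient.foldl stepA (0, [])).1

-- ===== PORT B =====
-- the inner 'for i in range(len(items)-3): … break' scan
def findPat (items : List Int) : Option Int :=
  (PySem.List.pyRange 0 ((items.length : Int) - 3) 1).find?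
    (fun i => PySem.List.slice items (some i) (some (i + 4)) = [1, 2, 3, 1])

theorem findPat_bounds {items : List Int} {i : Int} (h : findPat items = some i) :
    0 ≤ i ∧ i + 4 ≤ (items.length : Int) := by
  have hm := List.mem_of_find?_eq_some h
  rw [PySem.List.mem_pyRange_one] at hm
  omega

def solLoop (items : List Int) (count : Int) : Int :=
  match h : findPat items with
  | some i =>
      solLoop (PySem.List.slice items none (some i) ++
               PySem.List.slice items (some (i + 4)) none) (count + 1)
  | none => count
termination_by items.length
decreasing_by
  obtain ⟨h0, h4⟩ := findPat_bounds h
  rw [PySem.List.slice_to items h0, PySem.List.slice_from items (by omega)]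
  simp only [List.length_append, List.length_take, List.length_drop]
  omega

def solution_alt (ingredient : List Int) : Int :=
  solLoop ingredient 0

-- ===== PRECONDITION & SPEC =====
def Spec_solution (ingredient : List Int) (out : Int) : Prop := out = solution_alt ingredient
instance (ingredient : List Int) (out : Int) : Decidable (Spec_solution ingredient out) := by unfold Spec_solution; infer_instance

-- ===== CLAIM (what is proved, stated in full; the proofs are below) =====
def Claim_equal_solution : Prop := ∀ (ingredient : List Int), Dom_solution ingredient → Spec_solution ingredient (solution ingredient)

-- ===== LEMMAS AND PROOFS =====

-- A's guard "hamburger[-4:] == [1,2,3,1]" means: [1,2,3,1] is a suffix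
theorem guard_iff (l : List Int) :
    isBurger (PySem.List.slice l (some (-4)) none) = true ↔ [1, 2, 3, 1] <:+ l := by
  rw [PySem.List.slice_from_neg_ofNat l 4 (by omega)]
  constructor
  · intro h
    simp only [isBurger] at h
    split at h
    · next he => exact he ▸ List.drop_suffix _ l
    · simp at h
  · rintro ⟨u, rfl⟩
    have h1 : (u ++ [1, 2, 3, 1]).length - 4 = u.length := by simp
    rw [h1, List.drop_left]
    simp [isBurger]

-- the four pops on u ++ [1,2,3,1] leave u
theorem pops_eq (u : List Int) :
    (List.range 4).foldl (fun h _ => h.dropLast) (u ++ [1, 2, 3, 1]) = u := by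
  have h : u ++ [1, 2, 3, 1] = ((((u ++ [1]) ++ [2]) ++ [3]) ++ [1]) := by simp
  rw [h]
  simp [List.range_succ]

-- running A's fold through a stretch that never completes a burger just appends it
theorem foldA_safe (l : List Int) : ∀ (s : List Int) (c : Int),
    (∀ p x, p ++ [x] <+: l → ¬ [1, 2, 3, 1] <:+ (s ++ (p ++ [x]))) →
    l.foldl stepA (c, s) = (c, s ++ l) := by
  induction l with
  | nil => intro s c _; simp
  | cons x xs ih =>
      intro s c hsafe
      have hx : ¬ [1, 2, 3, 1] <:+ (s ++ [x]) := by
        have := hsafe [] x ⟨xs, by simp⟩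
        simpa using this
      have hstep : stepA (c, s) x = (c, s ++ [x]) := by
        simp only [stepA]
        rw [if_neg (by simpa [guard_iff] using hx)]
      rw [List.foldl_cons, hstep, ih (s ++ [x]) c ?_]
      · simp
      · intro p y hp
        have := hsafe (x :: p) y (by
          obtain ⟨t, ht⟩ := hp
          exact ⟨t, by simp [ht]⟩)
        simpa [List.append_assoc] using this

-- no occurrence of [1,2,3,1] starts strictly before position |a| in a ++ [1,2,3,1] ++ v
def FirstAt (a v : List Int) : Prop :=
  ∀ u w : List Int, a ++ [1, 2, 3, 1] ++ v = u ++ [1, 2, 3, 1] ++ w → a.length ≤ u.length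

-- under FirstAt, A's fold deletes exactly that block: one step of the recurrence
theorem foldA_first (a v : List Int) (c : Int) (hf : FirstAt a v) :
    (a ++ [1, 2, 3, 1] ++ v).foldl stepA (c, []) = v.foldl stepA (c + 1, a) := by
  have hsafe : ∀ p x, p ++ [x] <+: (a ++ [1, 2, 3]) →
      ¬ [1, 2, 3, 1] <:+ ([] ++ (p ++ [x])) := by
    rintro p x ⟨t, ht⟩ ⟨u, hu⟩
    simp only [List.nil_append] at hu
    rw [← hu] at ht
    have hl : (a ++ [1, 2, 3, 1] ++ v) = u ++ [1, 2, 3, 1] ++ (t ++ [1] ++ v) := by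
      calc a ++ [1, 2, 3, 1] ++ v = (a ++ [1, 2, 3]) ++ ([1] ++ v) := by simp
        _ = ((u ++ [1, 2, 3, 1]) ++ t) ++ ([1] ++ v) := by rw [ht]
        _ = u ++ [1, 2, 3, 1] ++ (t ++ [1] ++ v) := by simp
    have hle := hf u (t ++ [1] ++ v) hl
    have hlen := congrArg List.length ht
    simp [List.length_append] at hlen
    omega
  have hsplit : a ++ [1, 2, 3, 1] ++ v = (a ++ [1, 2, 3]) ++ ([1] ++ v) := by simp
  rw [hsplit, List.foldl_append]
  rw [foldA_safe (a ++ [1, 2, 3]) [] c hsafe]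
  have hstep : stepA (c, a ++ [1, 2, 3]) 1 = (c + 1, a) := by
    simp only [stepA]
    rw [if_pos (by rw [guard_iff]; exact ⟨a, by simp⟩)]
    have h2 : (a ++ [1, 2, 3]) ++ [1] = a ++ [1, 2, 3, 1] := by simp
    simp only [h2, pops_eq]
  simp only [List.nil_append, List.singleton_append, List.foldl_cons]
  rw [hstep]

-- a prefix containing no occurrence can be pre-folded onto the stack
theorem foldA_clean_prefix (a v : List Int) (c : Int)
    (hclean : ∀ u w : List Int, a ≠ u ++ [1, 2, 3, 1] ++ w) :
    (a ++ v).foldl stepA (c, []) = v.foldl stepA (c, a) := by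
  have hs : ∀ p x, p ++ [x] <+: a → ¬ [1, 2, 3, 1] <:+ ([] ++ (p ++ [x])) := by
    rintro p x ⟨t, ht⟩ ⟨u, hu⟩
    simp only [List.nil_append] at hu
    exact hclean u t (by rw [← ht, ← hu]; try simp)
  rw [List.foldl_append, foldA_safe a [] c hs]
  simp

-- a slice equal to the pattern yields a decomposition of the list
theorem occ_of_slice {items : List Int} {i : Int} (h0 : 0 ≤ i)
    (h : PySem.List.slice items (some i) (some (i + 4)) = [1, 2, 3, 1]) :
    items = items.take i.toNat ++ [1, 2, 3, 1] ++ items.drop (i.toNat + 4) ∧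
    (items.take i.toNat).length = i.toNat := by
  rw [PySem.List.slice_toNat items h0 (by omega)] at h
  have h4 : (i + 4).toNat - i.toNat = 4 := by omega
  rw [h4] at h
  have hlen : 4 ≤ (items.drop i.toNat).length := by
    have hp : [1, 2, 3, 1] <+: items.drop i.toNat := h ▸ List.take_prefix 4 _
    simpa using hp.length_le
  have hd : items.drop i.toNat = [1, 2, 3, 1] ++ items.drop (i.toNat + 4) := by
    conv_lhs => rw [← List.take_append_drop 4 (items.drop i.toNat)]
    rw [h, List.drop_drop]
  have hge : i.toNat ≤ items.length := by
    simp only [List.length_drop] at hlen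
    omega
  constructor
  · conv_lhs => rw [← List.take_append_drop i.toNat items]
    rw [hd, List.append_assoc]
  · exact List.length_take_of_le hge

-- slice at a genuine occurrence equals the pattern
theorem slice_at_occ (u w : List Int) :
    PySem.List.slice (u ++ [1, 2, 3, 1] ++ w) (some (u.length : Int))
      (some ((u.length : Int) + 4)) = [1, 2, 3, 1] := by
  have h := PySem.List.slice_natCast_add (u ++ [1, 2, 3, 1] ++ w) u.length 4
  have hc : ((4 : Nat) : Int) = (4 : Int) := by norm_num
  rw [hc] at h
  rw [h, List.append_assoc, List.drop_left]
  rfl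

-- findPat characterisation: the hit and its minimality
theorem findPat_some {items : List Int} {i : Int} (h : findPat items = some i) :
    PySem.List.slice items (some i) (some (i + 4)) = [1, 2, 3, 1] ∧
    ∀ j : Int, 0 ≤ j → j < i →
      PySem.List.slice items (some j) (some (j + 4)) ≠ [1, 2, 3, 1] := by
  rw [findPat, List.find?_eq_some_iff_append] at h
  obtain ⟨hp, as, bs, hsplit, hall⟩ := h
  refine ⟨by simpa using hp, ?_⟩
  intro j hj0 hji heq
  have hmem : j ∈ PySem.List.pyRange 0 ((items.length : Int) - 3) 1 := by
    rw [PySem.List.mem_pyRange_one]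
    have hb : i ∈ PySem.List.pyRange 0 ((items.length : Int) - 3) 1 := by
      rw [hsplit]; exact List.mem_append_right _ (List.mem_cons_self ..)
    rw [PySem.List.mem_pyRange_one] at hb
    omega
  have hpw := PySem.List.pairwise_lt_pyRange_one (a := 0) (b := (items.length : Int) - 3)
  rw [hsplit] at hmem hpw
  rw [List.pairwise_append] at hpw
  have hjas : j ∈ as := by
    rcases List.mem_append.mp hmem with h1 | h1
    · exact h1
    · rcases List.mem_cons.mp h1 with rfl | h2
      · omega
      · have := (List.pairwise_cons.mp hpw.2.1).1 j h2
        omega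
  have := hall j hjas
  simp only [Bool.not_eq_eq_eq_not, Bool.not_true, decide_eq_false_iff_not] at this
  exact this heq

theorem findPat_none {items : List Int} (h : findPat items = none)
    (u w : List Int) : items ≠ u ++ [1, 2, 3, 1] ++ w := by
  intro heq
  have hj : ((u.length : Int)) ∈ PySem.List.pyRange 0 ((items.length : Int) - 3) 1 := by
    rw [PySem.List.mem_pyRange_one]
    have := congrArg List.length heq
    simp [List.length_append] at this
    omega
  have hn := List.find?_eq_none.mp (by rw [findPat] at h; exact h) _ hj
  apply hn
  simp only [decide_eq_true_eq]
  rw [heq]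
  exact slice_at_occ u w

-- unfolding equations for solLoop
theorem solLoop_none {items : List Int} (h : findPat items = none) (c : Int) :
    solLoop items c = c := by
  rw [solLoop]
  split
  · next i hi => rw [h] at hi; exact absurd hi (by simp)
  · rfl

theorem solLoop_some {items : List Int} {i : Int} (h : findPat items = some i) (c : Int) :
    solLoop items c =
      solLoop (PySem.List.slice items none (some i) ++
               PySem.List.slice items (some (i + 4)) none) (c + 1) := by
  rw [solLoop]
  split
  · next j hj => rw [h] at hj; cases hj; rfl
  · next hn => rw [h] at hn; exact absurd hn (by simp)

-- MAIN: A's fold from (c, []) computes B's loop with accumulator c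
theorem main_lemma : ∀ (n : Nat) (l : List Int), l.length = n → ∀ c : Int,
    (l.foldl stepA (c, [])).1 = solLoop l c := by
  intro n
  induction n using Nat.strong_induction_on with
  | _ n ih =>
    intro l hl c
    cases h : findPat l with
    | none =>
        rw [solLoop_none h]
        have hsafe : ∀ p x, p ++ [x] <+: l → ¬ [1, 2, 3, 1] <:+ ([] ++ (p ++ [x])) := by
          rintro p x ⟨t, ht⟩ ⟨u, hu⟩
          simp only [List.nil_append] at hu
          exact findPat_none h u t (by rw [← ht, ← hu]; try simp)
        rw [foldA_safe l [] c hsafe]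
    | some i =>
        obtain ⟨h0, h4⟩ := findPat_bounds h
        obtain ⟨hsl, hmin⟩ := findPat_some h
        obtain ⟨hdec, hlena⟩ := occ_of_slice h0 hsl
        set a := l.take i.toNat with ha
        set v := l.drop (i.toNat + 4) with hv
        have hfirst : FirstAt a v := by
          intro u w huw
          have hlw : l = u ++ [1, 2, 3, 1] ++ w := by rw [hdec]; exact huw
          have hocc := slice_at_occ u w
          rw [← hlw] at hocc
          by_contra hlt
          exact hmin (u.length : Int) (by omega) (by omega) hocc
        have hclean : ∀ u w : List Int, a ≠ u ++ [1, 2, 3, 1] ++ w := by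
          intro u w hu
          have hlw : l = u ++ [1, 2, 3, 1] ++ (w ++ [1, 2, 3, 1] ++ v) := by
            rw [hdec, hu]; simp
          have hocc := slice_at_occ u (w ++ [1, 2, 3, 1] ++ v)
          rw [← hlw] at hocc
          have hulen : u.length + 4 ≤ i.toNat := by
            have := congrArg List.length hu
            rw [hlena] at this
            simp [List.length_append] at this
            omega
          exact hmin (u.length : Int) (by omega) (by omega) hocc
        have hlen_l : l.length = a.length + 4 + v.length := by
          have := congrArg List.length hdec
          simp [List.length_append] at this
          omega
        have hstep1 : (l.foldl stepA (c, [])).1 = ((a ++ v).foldl stepA (c + 1, [])).1 := by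
          conv_lhs => rw [hdec]
          rw [foldA_first a v c hfirst, foldA_clean_prefix a v (c + 1) hclean]
        have hrec : ((a ++ v).foldl stepA (c + 1, [])).1 = solLoop (a ++ v) (c + 1) := by
          apply ih ((a ++ v).length) (by simp only [List.length_append]; omega) _ rfl
        rw [hstep1, hrec, solLoop_some h c]
        congr 1
        rw [PySem.List.slice_to l h0, PySem.List.slice_from l (by omega)]
        have : (i + 4).toNat = i.toNat + 4 := by omega
        rw [this]

-- ===== VERDICT (by name: the statement is the Claim_ definition above) =====
theorem solution_spec : Claim_equal_solution := by
  intro ingredient _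
  show solution ingredient = solution_alt ingredient
  exact main_lemma ingredient.length ingredient rfl 0
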